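-- pv_equiv track=rewrite | github.com/omarzdat/2025-recruitment-technical-assessment | backend/py_template/devdonalds.py | parse_handwriting
-- ===== SOURCE A (Python) =====
-- from typing import List, Dict, Union
--
-- def parse_handwriting(recipeName: str) -> Union[str | None]:
-- 	if recipeName is None:
-- 		return None
--
-- 	# Hyphens and underscores
-- 	processed = recipeName.replace('-', ' ').replace('_', ' ')
--
-- 	# Non-alphabet
-- 	processed = ''.join(char for char in processed if char.isalpha() or char.isspace())
--
-- 	# Spaces, in and leading
-- 	processed = ' '.join(word for word in processed.split() if word)
--
-- 	# Lengthcheck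
-- 	if len(processed) == 0:
-- 		return None
--
-- 	# Capitalization :3
-- 	processed = ' '.join(word.capitalize() for word in processed.split())
--
-- 	return processed
-- ===== SOURCE B (Python) =====
-- def parse_handwriting(recipeName):
--     if recipeName is None:
--         return None
--     # single pass: split, clean and capitalize in one loop over the characters
--     words = []
--     buf = ''
--     for ch in recipeName:
--         if ch == '-' or ch == '_' or ch.isspace():
--             if buf:
--                 words.append(buf)
--             buf = ''
--         elif ch.isalpha():
--             buf += ch.upper() if not buf else ch.lower()
--         # any other character is deleted (fuses its neighbours)
--     if buf:
--         words.append(buf)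
--     if not words:
--         return None
--     return ' '.join(words)
-- ===== Notes on version B (the rewrite author's own statement) =====
-- stated objective: alternative
-- what changed: Replaces A's five-pass replace/filter/split/join/capitalize pipeline (which builds four intermediate strings) by a single pass over the characters with a current-word buffer, splitting, cleaning and capitalizing in one loop.
import Mathlib
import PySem

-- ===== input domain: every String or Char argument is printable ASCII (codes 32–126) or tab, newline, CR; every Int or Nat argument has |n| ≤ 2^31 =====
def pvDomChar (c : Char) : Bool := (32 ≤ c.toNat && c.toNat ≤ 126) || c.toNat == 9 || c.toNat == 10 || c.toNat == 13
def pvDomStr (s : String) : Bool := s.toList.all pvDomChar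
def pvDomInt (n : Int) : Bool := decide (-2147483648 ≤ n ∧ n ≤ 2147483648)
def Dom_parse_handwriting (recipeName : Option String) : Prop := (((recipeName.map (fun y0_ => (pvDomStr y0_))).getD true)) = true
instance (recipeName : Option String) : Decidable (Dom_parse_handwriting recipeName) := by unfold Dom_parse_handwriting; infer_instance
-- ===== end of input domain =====

-- B replaces A's five-pass replace/filter/split/join pipeline by one pass over the characters
-- with a word buffer, capitalizing as it goes (capitalize ported char-wise; exact on the ASCII domain).

-- ===== PORT A =====
-- word.capitalize(): first char upper-cased, tail lower-cased (exact on the ASCII domain)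
def pyCapitalize (s : String) : String :=
  match s.toList with
  | [] => s
  | c :: rest => String.ofList (PySem.Chars.upperChar c :: PySem.Chars.lower rest)

def parse_handwriting (recipeName : Option String) : Option String :=
  match recipeName with
  | none => none
  | some s =>
    -- Hyphens and underscores
    let p1 := PySem.Str.replace (PySem.Str.replace s "-" " ") "_" " "
    -- Non-alphabet: ''.join(char for char in processed if char.isalpha() or char.isspace())
    let p2 := String.ofList (PySem.Chars.join []
      ((p1.toList.filter (fun c => PySem.Chars.isalpha c || PySem.Chars.isspace c)).map (fun c => [c])))
    -- Spaces, in and leading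
    let p3 := PySem.Str.join " " ((PySem.Str.split₀ p2).filter (fun w => w ≠ ""))
    -- Lengthcheck
    if PySem.Str.len p3 = 0 then none
    -- Capitalization :3
    else some (PySem.Str.join " " ((PySem.Str.split₀ p3).map pyCapitalize))

-- ===== PORT B =====
def pvFlush (ws : List (List Char)) (buf : List Char) : List (List Char) :=
  if buf.isEmpty then ws else ws ++ [buf]

def pvScan : List Char → List (List Char) → List Char → List (List Char)
  | [], ws, buf => pvFlush ws buf
  | c :: rest, ws, buf =>
    if c = '-' ∨ c = '_' ∨ PySem.Chars.isspace c then
      pvScan rest (pvFlush ws buf) []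
    else if PySem.Chars.isalpha c then
      pvScan rest ws (buf ++ [if buf.isEmpty then PySem.Chars.upperChar c else PySem.Chars.lowerChar c])
    else
      pvScan rest ws buf

def parse_handwriting_alt (recipeName : Option String) : Option String :=
  match recipeName with
  | none => none
  | some s =>
    let ws := pvScan s.toList [] []
    if ws.isEmpty then none
    else some (String.ofList (PySem.Chars.join [' '] ws))

-- ===== PRECONDITION & SPEC =====
def Spec_parse_handwriting (recipeName : Option String) (out : Option String) : Prop := out = parse_handwriting_alt recipeName
instance (recipeName : Option String) (out : Option String) : Decidable (Spec_parse_handwriting recipeName out) := by unfold Spec_parse_handwriting; infer_instance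

-- ===== CLAIM (what is proved, stated in full; the proofs are below) =====
def Claim_equal_parse_handwriting : Prop := ∀ (recipeName : Option String), Dom_parse_handwriting recipeName → Spec_parse_handwriting recipeName (parse_handwriting recipeName)

-- ===== LEMMAS AND PROOFS =====

-- the composed effect of the two single-char replaces
def pvMap1 (c : Char) : Char := if c = '-' then ' ' else c
def pvMap2 (c : Char) : Char := if c = '_' then ' ' else c
def pvKeep (c : Char) : Bool := PySem.Chars.isalpha c || PySem.Chars.isspace c
-- the character list A's pipeline splits into words
def pvF (cs : List Char) : List Char := ((cs.map pvMap1).map pvMap2).filter pvKeep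
-- capitalize on the list side
def pvCap : List Char → List Char
  | [] => []
  | c :: rest => PySem.Chars.upperChar c :: rest.map PySem.Chars.lowerChar

theorem pvReplace_go_single (o n : Char) :
    ∀ (l : List Char) (fuel : Nat) (acc : List Char), l.length ≤ fuel →
      PySem.Chars.replace.go [o] [n] fuel l acc
        = acc.reverse ++ l.map (fun c => if c = o then n else c) := by
  intro l
  induction l with
  | nil => intro fuel acc _; cases fuel <;> simp [PySem.Chars.replace.go]
  | cons c t ih =>
    intro fuel acc h
    cases fuel with
    | zero => simp at h
    | succ m =>
      simp only [PySem.Chars.replace.go]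
      by_cases hc : c = o
      · simp [List.isPrefixOf, hc, ih m (n :: acc) (by simpa using h)]
      · simp [List.isPrefixOf, hc, Ne.symm hc, ih m (c :: acc) (by simpa using h)]

theorem pvReplace_single (o n : Char) (l : List Char) :
    PySem.Chars.replace l [o] [n] = l.map (fun c => if c = o then n else c) := by
  simpa using pvReplace_go_single o n l l.length [] le_rfl

theorem pvCap_snoc (l : List Char) (c : Char) :
    pvCap (l ++ [c]) = pvCap l ++ [if l.isEmpty then PySem.Chars.upperChar c else PySem.Chars.lowerChar c] := by
  cases l <;> simp [pvCap]

theorem pvCap_isEmpty (l : List Char) : (pvCap l).isEmpty = l.isEmpty := by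
  cases l <;> simp [pvCap]

theorem pvScan_go :
    ∀ (cs : List Char) (acc : List (List Char)) (cur : List Char),
      pvScan cs (acc.reverse.map pvCap) (pvCap cur.reverse)
        = (PySem.Chars.split₀.go (pvF cs) cur acc).map pvCap := by
  intro cs
  induction cs with
  | nil =>
    intro acc cur
    by_cases hc : cur = []
    · subst hc; simp [pvF, PySem.Chars.split₀.go, pvScan, pvFlush, pvCap]
    · have h2 : (pvCap cur.reverse).isEmpty = false := by
        simp [pvCap_isEmpty, hc]
      simp [pvF, PySem.Chars.split₀.go, pvScan, pvFlush, h2, List.isEmpty_iff, hc]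
  | cons c rest ih =>
    intro acc cur
    by_cases hsep : c = '-' ∨ c = '_' ∨ PySem.Chars.isspace c = true
    · have hd : PySem.Chars.isspace (pvMap2 (pvMap1 c)) = true := by
        rcases hsep with rfl | rfl | hs
        · decide
        · decide
        · have h1 : c ≠ '-' := by rintro rfl; revert hs; decide
          have h2 : c ≠ '_' := by rintro rfl; revert hs; decide
          simpa [pvMap1, pvMap2, h1, h2] using hs
      have hF : pvF (c :: rest) = pvMap2 (pvMap1 c) :: pvF rest := by
        simp [pvF, pvKeep, hd]
      rw [hF]
      simp only [PySem.Chars.split₀.go, hd, if_true, pvScan, if_pos hsep, pvFlush]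
      by_cases hcur : cur = []
      · subst hcur
        simpa [pvCap] using ih acc []
      · have h2 : (pvCap cur.reverse).isEmpty = false := by
          simp [pvCap_isEmpty, hcur]
        have h3 : cur.isEmpty = false := by simp [hcur]
        rw [h2, h3]
        simp only [Bool.false_eq_true, if_false]
        have := ih (cur.reverse :: acc) []
        simpa [pvCap] using this
    · rw [not_or, not_or] at hsep
      obtain ⟨h1, h2, h3⟩ := hsep
      have hm : pvMap2 (pvMap1 c) = c := by simp [pvMap1, pvMap2, h1, h2]
      have hns : PySem.Chars.isspace c = false := by
        cases hx : PySem.Chars.isspace c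
        · rfl
        · exact absurd hx h3
      by_cases halpha : PySem.Chars.isalpha c = true
      · have hF : pvF (c :: rest) = c :: pvF rest := by
          simp [pvF, pvKeep, hm, halpha]
        rw [hF]
        simp only [PySem.Chars.split₀.go, hns, Bool.false_eq_true, if_false, pvScan, halpha, if_true]
        rw [if_neg (by simp [h1, h2])]
        have hb : pvCap cur.reverse ++
            [if (pvCap cur.reverse).isEmpty then PySem.Chars.upperChar c else PySem.Chars.lowerChar c]
            = pvCap ((c :: cur).reverse) := by
          rw [pvCap_isEmpty]
          simp [pvCap_snoc]
        rw [hb]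
        exact ih acc (c :: cur)
      · have halpha' : PySem.Chars.isalpha c = false := by
          cases hx : PySem.Chars.isalpha c
          · rfl
          · exact absurd hx halpha
        have hF : pvF (c :: rest) = pvF rest := by
          simp [pvF, pvKeep, hm, halpha', hns]
        rw [hF]
        simp only [pvScan, hns, halpha', Bool.false_eq_true, if_false]
        rw [if_neg (by simp [h1, h2])]
        exact ih acc cur

-- every word produced by split₀ is nonempty and whitespace-free
theorem pvGo_sound :
    ∀ (l cur : List Char) (acc : List (List Char)),
      (∀ w ∈ acc, w ≠ [] ∧ ∀ d ∈ w, PySem.Chars.isspace d = false) →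
      (∀ d ∈ cur, PySem.Chars.isspace d = false) →
      ∀ w ∈ PySem.Chars.split₀.go l cur acc, w ≠ [] ∧ ∀ d ∈ w, PySem.Chars.isspace d = false := by
  intro l
  induction l with
  | nil =>
    intro cur acc hacc hcur
    by_cases hc : cur = []
    · subst hc
      simpa [PySem.Chars.split₀.go] using hacc
    · have : cur.isEmpty = false := by simp [hc]
      simp only [PySem.Chars.split₀.go, this, Bool.false_eq_true, if_false]
      intro w hw
      simp only [List.reverse_cons, List.mem_append, List.mem_reverse, List.mem_singleton] at hw
      rcases hw with hw | rfl
      · exact hacc w hw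
      · refine ⟨by simpa using hc, ?_⟩
        intro d hd
        exact hcur d (by simpa using hd)
  | cons c t ih =>
    intro cur acc hacc hcur
    by_cases hs : PySem.Chars.isspace c = true
    · by_cases hc : cur = []
      · subst hc
        have he : ([] : List Char).isEmpty = true := rfl
        simp only [PySem.Chars.split₀.go, hs, if_true, he]
        exact ih [] acc hacc (by simp)
      · have he : cur.isEmpty = false := by simp [hc]
        simp only [PySem.Chars.split₀.go, hs, if_true, he, Bool.false_eq_true, if_false]
        refine ih [] (cur.reverse :: acc) ?_ (by simp)
        intro w hw
        rcases List.mem_cons.mp hw with rfl | hw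
        · exact ⟨by simpa using hc, fun d hd => hcur d (by simpa using hd)⟩
        · exact hacc w hw
    · have hs' : PySem.Chars.isspace c = false := by
        cases hx : PySem.Chars.isspace c
        · rfl
        · exact absurd hx hs
      simp only [PySem.Chars.split₀.go, hs', Bool.false_eq_true, if_false]
      refine ih (c :: cur) acc hacc ?_
      intro d hd
      rcases List.mem_cons.mp hd with rfl | hd
      · exact hs'
      · exact hcur d hd

-- split₀.go consumes a whitespace-free block into the current word
theorem pvGo_word :
    ∀ (w rest cur : List Char) (acc : List (List Char)),
      (∀ d ∈ w, PySem.Chars.isspace d = false) →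
      PySem.Chars.split₀.go (w ++ rest) cur acc
        = PySem.Chars.split₀.go rest (w.reverse ++ cur) acc := by
  intro w
  induction w with
  | nil => intro rest cur acc _; simp
  | cons c t ih =>
    intro rest cur acc h
    have hc : PySem.Chars.isspace c = false := h c (by simp)
    simp only [List.cons_append, PySem.Chars.split₀.go, hc, Bool.false_eq_true, if_false]
    rw [ih rest (c :: cur) acc (fun d hd => h d (by simp [hd]))]
    simp

-- splitting the single-space join of nonempty whitespace-free words gives them back
theorem pvSplit_join :
    ∀ (W : List (List Char)) (acc : List (List Char)),
      (∀ w ∈ W, w ≠ [] ∧ ∀ d ∈ w, PySem.Chars.isspace d = false) →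
      PySem.Chars.split₀.go (PySem.Chars.join [' '] W) [] acc = acc.reverse ++ W := by
  intro W
  induction W with
  | nil => intro acc _; simp [PySem.Chars.join, List.intercalate, PySem.Chars.split₀.go]
  | cons w ws ih =>
    intro acc h
    obtain ⟨hw, hwsp⟩ := h w (by simp)
    cases ws with
    | nil =>
      have hj : PySem.Chars.join [' '] [w] = w := by simp [PySem.Chars.join, List.intercalate]
      rw [hj, ← List.append_nil w, pvGo_word w [] [] acc hwsp]
      have he : (w.reverse ++ []).isEmpty = false := by simp [hw]
      simp only [PySem.Chars.split₀.go, he, Bool.false_eq_true, if_false]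
      simp
    | cons v vs =>
      have hj : PySem.Chars.join [' '] (w :: v :: vs)
          = w ++ [' '] ++ PySem.Chars.join [' '] (v :: vs) := by
        simp [PySem.Chars.join, List.intercalate]
      rw [hj, List.append_assoc, pvGo_word w _ [] acc hwsp]
      have he : (w.reverse ++ []).isEmpty = false := by simp [hw]
      have hsp : PySem.Chars.isspace ' ' = true := by decide
      simp only [List.cons_append, List.nil_append, PySem.Chars.split₀.go, hsp, if_true, he,
        Bool.false_eq_true, if_false]
      simp only [List.append_nil, List.reverse_reverse]
      rw [ih (w :: acc) (fun u hu => h u (by simp [hu]))]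
      simp

-- (pyCapitalize w).toList = pvCap w.toList
theorem pvCapitalize_toList (w : String) : (pyCapitalize w).toList = pvCap w.toList := by
  cases hw : w.toList with
  | nil => simp [pyCapitalize, hw, pvCap]
  | cons c rest => simp [pyCapitalize, hw, pvCap, PySem.Chars.lower]

-- characterisation of B
theorem pvB_char (s : String) :
    parse_handwriting_alt (some s)
      = (if PySem.Chars.split₀ (pvF s.toList) = [] then none
         else some (String.ofList (PySem.Chars.join [' ']
           ((PySem.Chars.split₀ (pvF s.toList)).map pvCap)))) := by
  have hscan : pvScan s.toList [] [] = (PySem.Chars.split₀ (pvF s.toList)).map pvCap := by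
    simpa [pvCap, PySem.Chars.split₀] using pvScan_go s.toList [] []
  simp only [parse_handwriting_alt, hscan]
  by_cases h : PySem.Chars.split₀ (pvF s.toList) = []
  · simp [h]
  · have : ((PySem.Chars.split₀ (pvF s.toList)).map pvCap).isEmpty = false := by
      simp [List.isEmpty_eq_false_iff, h]
    simp [this, h]

-- characterisation of A
set_option maxHeartbeats 1000000 in
theorem pvA_char (s : String) :
    parse_handwriting (some s)
      = (if PySem.Chars.split₀ (pvF s.toList) = [] then none
         else some (String.ofList (PySem.Chars.join [' ']
           ((PySem.Chars.split₀ (pvF s.toList)).map pvCap)))) := by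
  have hp1 : (PySem.Str.replace (PySem.Str.replace s "-" " ") "_" " ").toList
      = (s.toList.map pvMap1).map pvMap2 := by
    rw [PySem.Str.toList_replace, PySem.Str.toList_replace]
    show PySem.Chars.replace (PySem.Chars.replace s.toList ['-'] [' ']) ['_'] [' '] = _
    rw [pvReplace_single, pvReplace_single]
    simp [pvMap1, pvMap2]
  have hp2 : (String.ofList (PySem.Chars.join []
      (((PySem.Str.replace (PySem.Str.replace s "-" " ") "_" " ").toList.filter
        (fun c => PySem.Chars.isalpha c || PySem.Chars.isspace c)).map (fun c => [c])))).toList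
      = pvF s.toList := by
    rw [String.toList_ofList, PySem.Chars.join_nil_singletons, hp1]
    simp only [pvF, List.map_map]
    exact List.filter_congr (fun c _ => by simp [pvKeep])
  set p2 := String.ofList (PySem.Chars.join []
      (((PySem.Str.replace (PySem.Str.replace s "-" " ") "_" " ").toList.filter
        (fun c => PySem.Chars.isalpha c || PySem.Chars.isspace c)).map (fun c => [c]))) with hp2def
  set W := PySem.Chars.split₀ (pvF s.toList) with hW
  have hsound : ∀ w ∈ W, w ≠ [] ∧ ∀ d ∈ w, PySem.Chars.isspace d = false := by
    intro w hw
    exact pvGo_sound (pvF s.toList) [] [] (by simp) (by simp) w hw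
  have hwords : List.map String.toList (PySem.Str.split₀ p2) = W := by
    rw [PySem.Str.split₀_map_toList, hp2]
  have hne : ∀ w ∈ PySem.Str.split₀ p2, w ≠ "" := by
    intro w hw heq
    have : w.toList ∈ W := hwords ▸ List.mem_map_of_mem hw
    exact (hsound _ this).1 (by simp [heq])
  have hfilter : (PySem.Str.split₀ p2).filter (fun w => w ≠ "") = PySem.Str.split₀ p2 := by
    apply List.filter_eq_self.mpr
    intro w hw
    simpa using hne w hw
  have hp3 : (PySem.Str.join " " ((PySem.Str.split₀ p2).filter (fun w => w ≠ ""))).toList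
      = PySem.Chars.join [' '] W := by
    rw [hfilter, PySem.Str.toList_join, hwords]
    rfl
  simp only [parse_handwriting]
  rw [← hp2def]
  clear_value W
  clear_value p2
  by_cases hWnil : W = []
  · have : PySem.Str.len (PySem.Str.join " " ((PySem.Str.split₀ p2).filter (fun w => w ≠ ""))) = 0 := by
      rw [PySem.Str.len_eq, hp3, hWnil]
      simp [PySem.Chars.join, List.intercalate]
    rw [if_pos this, if_pos hWnil]
  · have hlen : PySem.Str.len (PySem.Str.join " " ((PySem.Str.split₀ p2).filter (fun w => w ≠ ""))) ≠ 0 := by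
      rw [PySem.Str.len_eq, hp3]
      cases hWc : W with
      | nil => exact absurd hWc hWnil
      | cons w ws =>
        have hwne : w ≠ [] := (hsound w (by simp [hWc])).1
        cases ws with
        | nil =>
          rw [show PySem.Chars.join [' '] [w] = w from by simp [PySem.Chars.join, List.intercalate]]
          simp [List.length_eq_zero_iff, hwne]
        | cons v vs =>
          rw [show PySem.Chars.join [' '] (w :: v :: vs)
              = w ++ [' '] ++ PySem.Chars.join [' '] (v :: vs) from by
            simp [PySem.Chars.join, List.intercalate]]
          simp
          omega
    rw [if_neg hlen]
    rw [if_neg hWnil]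
    refine congrArg some ?_
    have hsplit3 : PySem.Chars.split₀
        ((PySem.Str.join " " ((PySem.Str.split₀ p2).filter (fun w => w ≠ ""))).toList) = W := by
      rw [hp3]
      simpa [PySem.Chars.split₀] using pvSplit_join W [] hsound
    have hcomp : (String.toList ∘ pyCapitalize) = pvCap ∘ String.toList := by
      funext w; exact pvCapitalize_toList w
    have hmap : List.map String.toList ((PySem.Str.split₀
          (PySem.Str.join " " ((PySem.Str.split₀ p2).filter (fun w => w ≠ "")))).map pyCapitalize)
        = List.map pvCap W := by
      rw [List.map_map, hcomp, ← List.map_map, PySem.Str.split₀_map_toList, hsplit3]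
    show PySem.Str.join " " _ = _
    simp only [PySem.Str.join]
    refine congrArg String.ofList ?_
    show PySem.Chars.join [' '] _ = _
    exact congrArg (PySem.Chars.join [' ']) hmap

theorem parse_handwriting_spec : Claim_equal_parse_handwriting := by
  intro recipeName _
  unfold Spec_parse_handwriting
  cases recipeName with
  | none => rfl
  | some s => rw [pvA_char, pvB_char]
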